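-- pv_equiv track=rewrite | github.com/achimdehnert/platform | apps/bfagent/scripts/helpers/generate/generate_book_v2.py | _parse_outline
-- ===== SOURCE A (Python) =====
-- def _parse_outline(outline: str) -> list:
--     """Parse outline into chapter list"""
--     chapters = []
--     lines = outline.strip().split('\n')
--
--     current_chapter = None
--
--     for line in lines:
--         line = line.strip()
--         if not line:
--             continue
--
--         # Check if this is a chapter heading
--         if line.lower().startswith('chapter') or line.startswith('#'):
--             if current_chapter:
--                 chapters.append(current_chapter)
--
--             chapter_title = line.replace('#', '').strip()
--             current_chapter = {
--                 'title': chapter_title,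
--                 'description': ''
--             }
--         elif current_chapter:
--             current_chapter['description'] += line + ' '
--
--     if current_chapter:
--         chapters.append(current_chapter)
--
--     if not chapters:
--         chapters = [{'title': 'Chapter 1', 'description': outline}]
--
--     return chapters
-- ===== SOURCE B (Python) =====
-- def _parse_outline(outline: str) -> list:
--     """Parse outline into chapter list (back-to-front single pass)."""
--     lines = [s for s in (ln.strip() for ln in outline.strip().split('\n')) if s]
--     chapters = []
--     body = []
--     for line in reversed(lines):
--         if line.lower().startswith('chapter') or line.startswith('#'):
--             desc = ''.join(s + ' ' for s in body)
--             chapters = [{'title': line.replace('#', '').strip(), 'description': desc}] + chapters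
--             body = []
--         else:
--             body = [line] + body
--     if not chapters:
--         return [{'title': 'Chapter 1', 'description': outline}]
--     return chapters
-- ===== Notes on version B (the rewrite author's own statement) =====
-- stated objective: alternative
-- what changed: B first cleans the lines (strip, drop empties) and then builds the chapter list in a single back-to-front pass, prepending each finished chapter, instead of A's forward pass that threads an optional pending-chapter dict with append-on-next-heading bookkeeping.
import Mathlib
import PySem

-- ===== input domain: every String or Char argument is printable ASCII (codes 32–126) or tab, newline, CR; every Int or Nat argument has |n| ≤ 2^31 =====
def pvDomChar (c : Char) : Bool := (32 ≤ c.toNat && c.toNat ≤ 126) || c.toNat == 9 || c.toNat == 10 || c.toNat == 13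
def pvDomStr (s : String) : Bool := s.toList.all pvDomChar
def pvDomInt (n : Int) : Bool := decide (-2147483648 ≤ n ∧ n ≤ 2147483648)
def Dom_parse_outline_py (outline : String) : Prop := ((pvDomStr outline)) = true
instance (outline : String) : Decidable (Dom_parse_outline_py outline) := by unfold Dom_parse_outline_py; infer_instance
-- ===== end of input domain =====

-- B re-parses the outline in ONE back-to-front pass (segments built from the right), instead of
-- A's forward pass that threads an Option-typed "current chapter" accumulator; same return value.

-- shared transliterations of the Python expressions both sources contain
def pvHeadQ (line : List Char) : Bool :=
  PySem.Chars.startswith (PySem.Chars.lower line) "chapter".toList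
    || PySem.Chars.startswith line "#".toList

def pvTitle (line : List Char) : List Char :=
  PySem.Chars.strip (PySem.Chars.replace line "#".toList "".toList)

def pvRecord (t d : List Char) : List (String × String) :=
  [("title", String.ofList t), ("description", String.ofList d)]

-- ===== PORT A =====
-- A's loop step on an already-stripped nonempty line (state = (chapters, current_chapter))
def pvStepA (st : List (List (String × String)) × Option (List Char × List Char))
    (line : List Char) : List (List (String × String)) × Option (List Char × List Char) :=
  if pvHeadQ line then
    ((match st.2 with
      | some c => st.1 ++ [pvRecord c.1 c.2]
      | none => st.1), some (pvTitle line, []))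
  else
    match st.2 with
    | some c => (st.1, some (c.1, c.2 ++ line ++ [' ']))
    | none => st

def parse_outline_py (outline : String) : List (List (String × String)) :=
  let lines := PySem.Chars.splitOn (PySem.Chars.strip outline.toList) "\n".toList
  let st := lines.foldl
    (fun st rawline =>
      let line := PySem.Chars.strip rawline
      if line = [] then st else pvStepA st line)
    ([], none)
  let chapters :=
    match st.2 with
    | some c => st.1 ++ [pvRecord c.1 c.2]
    | none => st.1
  if chapters = [] then [[("title", "Chapter 1"), ("description", outline)]] else chapters

-- ===== PORT B =====
-- ''.join(s + ' ' for s in body)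
def pvDesc (body : List (List Char)) : List Char :=
  PySem.Chars.join [] (body.map (fun s => s ++ [' ']))

-- B's loop step (state = (chapters, body)), applied to the lines in reverse
def pvStepB (st : List (List (String × String)) × List (List Char))
    (line : List Char) : List (List (String × String)) × List (List Char) :=
  if pvHeadQ line then
    ([pvRecord (pvTitle line) (pvDesc st.2)] ++ st.1, [])
  else
    (st.1, [line] ++ st.2)

def parse_outline_py_alt (outline : String) : List (List (String × String)) :=
  let lines := ((PySem.Chars.splitOn (PySem.Chars.strip outline.toList) "\n".toList).map
      PySem.Chars.strip).filter (fun s => s ≠ [])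
  let st := lines.reverse.foldl pvStepB ([], [])
  if st.1 = [] then [[("title", "Chapter 1"), ("description", outline)]] else st.1

-- ===== PRECONDITION & SPEC =====
def Spec_parse_outline_py (outline : String) (out : List (List (String × String))) : Prop := out = parse_outline_py_alt outline
instance (outline : String) (out : List (List (String × String))) : Decidable (Spec_parse_outline_py outline out) := by unfold Spec_parse_outline_py; infer_instance

-- ===== CLAIM (what is proved, stated in full; the proofs are below) =====
def Claim_equal_parse_outline_py : Prop := ∀ (outline : String), Dom_parse_outline_py outline → Spec_parse_outline_py outline (parse_outline_py outline)

-- ===== LEMMAS AND PROOFS =====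

-- A's fold over raw lines = the plain pvStepA fold over the stripped, non-empty lines
theorem pv_foldA_clean (L : List (List Char))
    (st : List (List (String × String)) × Option (List Char × List Char)) :
    L.foldl (fun st rawline =>
        let line := PySem.Chars.strip rawline
        if line = [] then st else pvStepA st line) st
      = ((L.map PySem.Chars.strip).filter (fun s => s ≠ [])).foldl pvStepA st := by
  induction L generalizing st with
  | nil => rfl
  | cons x xs ih =>
      simp only [List.foldl_cons, List.map_cons, List.filter_cons]
      by_cases h : PySem.Chars.strip x = []
      · simp [h, ih]
      · simp [h, ih]

-- finalize A's state
def pvFin (st : List (List (String × String)) × Option (List Char × List Char)) :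
    List (List (String × String)) :=
  match st.2 with
  | some c => st.1 ++ [pvRecord c.1 c.2]
  | none => st.1

-- merge a pending chapter with B's (chapters, body) pair
def pvEmit (cur : Option (List Char × List Char))
    (bst : List (List (String × String)) × List (List Char)) :
    List (List (String × String)) :=
  match cur with
  | none => bst.1
  | some c => [pvRecord c.1 (c.2 ++ pvDesc bst.2)] ++ bst.1

@[simp] theorem pvDesc_nil : pvDesc [] = [] := by simp [pvDesc, PySem.Chars.join, List.intercalate]

@[simp] theorem pvDesc_cons (x : List Char) (l : List (List Char)) :
    pvDesc (x :: l) = x ++ [' '] ++ pvDesc l := by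
  cases l <;> simp [pvDesc, PySem.Chars.join, List.intercalate]

-- main invariant: A's forward fold, finalized, equals the pending chapter merged into B's
-- backward fold
theorem pv_main (L : List (List Char)) (acc : List (List (String × String)))
    (cur : Option (List Char × List Char)) :
    pvFin (L.foldl pvStepA (acc, cur))
      = acc ++ pvEmit cur (L.foldr (fun line st => pvStepB st line) ([], [])) := by
  induction L generalizing acc cur with
  | nil =>
      cases cur with
      | none => simp [pvFin, pvEmit]
      | some c => simp [pvFin, pvEmit]
  | cons x xs ih =>
      simp only [List.foldl_cons, List.foldr_cons]
      by_cases h : pvHeadQ x = true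
      · cases cur with
        | none => simp [pvStepA, pvStepB, h, ih, pvEmit]
        | some c => simp [pvStepA, pvStepB, h, ih, pvEmit]
      · cases cur with
        | none => simp [pvStepA, pvStepB, h, ih, pvEmit]
        | some c => simp [pvStepA, pvStepB, h, ih, pvEmit]

-- ===== VERDICT (by name: the statement is the Claim_ definition above) =====
theorem parse_outline_py_spec : Claim_equal_parse_outline_py := by
  intro outline _
  unfold Spec_parse_outline_py parse_outline_py parse_outline_py_alt
  simp only [pv_foldA_clean, List.foldl_reverse]
  have h := pv_main
    (((PySem.Chars.splitOn (PySem.Chars.strip outline.toList) "\n".toList).map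
        PySem.Chars.strip).filter (fun s => s ≠ [])) [] none
  simp only [pvFin, pvEmit, List.nil_append] at h
  rw [h]
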